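-- pv_equiv track=rewrite | github.com/KeFangPsych/prag_net | web/rsa_speaker_experiment/generate_stimuli_twemoji.py | generate_all_outcomes
-- ===== SOURCE A (Python) =====
-- from typing import Tuple, List, Optional, Dict
-- import itertools
--
-- def generate_all_outcomes(n: int = 5, m: int = 4) -> List[Tuple[int, ...]]:
--     """
--     Generate all possible observation tuples for World(n, m).
--     """
--     outcomes = []
--     for dividers in itertools.combinations(range(n + m), m):
--         counts = []
--         prev = -1
--         for d in dividers:
--             counts.append(d - prev - 1)
--             prev = d
--         counts.append(n + m - prev - 1)
--         outcomes.append(tuple(counts))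
--     return outcomes
-- ===== SOURCE B (Python) =====
-- def generate_all_outcomes(n: int = 5, m: int = 4):
--     # Grow count tuples left to right; prefixes are shared linked chains
--     # (value, parent) with newest value first, so extension is O(1).
--     parts = [(None, n)]
--     for _ in range(m):
--         parts = [((c, chain), rem - c) for (chain, rem) in parts for c in range(rem + 1)]
--     outcomes = []
--     for chain, rem in parts:
--         rev = [rem]
--         while chain is not None:
--             rev.append(chain[0])
--             chain = chain[1]
--         outcomes.append(tuple(reversed(rev)))
--     return outcomes
-- ===== Notes on version B (the rewrite author's own statement) =====
-- stated objective: alternative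
-- what changed: Replaces the stars-and-bars enumeration (itertools.combinations of divider positions followed by a gap-difference pass) with an iterative layer-by-layer composition builder that extends shared (prefix-chain, remaining-mass) pairs one coordinate at a time and materializes the tuples at the end.
import Mathlib
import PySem

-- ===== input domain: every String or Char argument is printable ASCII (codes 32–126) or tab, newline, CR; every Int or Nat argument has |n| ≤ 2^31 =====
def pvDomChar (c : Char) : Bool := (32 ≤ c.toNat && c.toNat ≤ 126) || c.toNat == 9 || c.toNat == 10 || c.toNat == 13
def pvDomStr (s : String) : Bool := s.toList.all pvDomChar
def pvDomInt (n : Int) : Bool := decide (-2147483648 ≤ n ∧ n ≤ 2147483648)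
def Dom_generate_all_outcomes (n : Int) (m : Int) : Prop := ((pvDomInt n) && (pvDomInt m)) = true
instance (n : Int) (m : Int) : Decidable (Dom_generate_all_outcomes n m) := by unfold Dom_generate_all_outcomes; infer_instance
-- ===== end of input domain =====

-- B replaces the stars-and-bars combinations enumeration with a direct recursive
-- composition enumerator (alternative decomposition; same output, same order).

-- ===== PORT A =====
-- itertools.combinations(l, k) in Python's lexicographic order
-- (like itertools, it returns [] immediately when k exceeds the pool length)
def pvCombos (l : List Int) (k : Nat) : List (List Int) :=
  if l.length < k then []
  else match k, l with
  | 0, _ => [[]]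
  | _ + 1, [] => []
  | k + 1, x :: xs => (pvCombos xs k).map (x :: ·) ++ pvCombos xs (k + 1)

def generate_all_outcomes (n : Int) (m : Int) : List (List Int) :=
  (pvCombos (PySem.List.pyRange 0 (n + m) 1) m.toNat).map (fun dividers =>
    let st := dividers.foldl
      (fun (acc : List Int × Int) d => (acc.1 ++ [d - acc.2 - 1], d)) ([], -1)
    st.1 ++ [n + m - st.2 - 1])

-- ===== PORT B =====
-- one layer of growth: extend every (chain, rem) pair by each choice c in range(rem + 1)
-- (Source B's linked chains (c, parent) are Lean lists built by cons, newest value first)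
def pvExpand (parts : List (List Int × Int)) : List (List Int × Int) :=
  parts.flatMap (fun pr =>
    (PySem.List.pyRange 0 (pr.2 + 1) 1).map (fun c => (c :: pr.1, pr.2 - c)))

def generate_all_outcomes_alt (n : Int) (m : Int) : List (List Int) :=
  ((PySem.List.pyRange 0 m 1).foldl (fun ps _ => pvExpand ps) [([], n)]).map
    (fun pr => (pr.2 :: pr.1).reverse)

-- ===== PRECONDITION & SPEC =====
-- Pre_ excludes m < 0, where A raises ValueError (combinations with negative r).
def Pre_generate_all_outcomes (n : Int) (m : Int) : Prop := 0 ≤ m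
instance (n : Int) (m : Int) : Decidable (Pre_generate_all_outcomes n m) := by
  unfold Pre_generate_all_outcomes; infer_instance

def pvWitness_generate_all_outcomes : Int × Int := (5, 4)

def Spec_generate_all_outcomes (n : Int) (m : Int) (out : List (List Int)) : Prop := out = generate_all_outcomes_alt n m
instance (n : Int) (m : Int) (out : List (List Int)) : Decidable (Spec_generate_all_outcomes n m out) := by unfold Spec_generate_all_outcomes; infer_instance

-- ===== CLAIM (what is proved, stated in full; the proofs are below) =====
def Claim_equal_generate_all_outcomes : Prop := ∀ (n : Int) (m : Int), Dom_generate_all_outcomes n m → Pre_generate_all_outcomes n m → Spec_generate_all_outcomes n m (generate_all_outcomes n m)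

-- ===== LEMMAS AND PROOFS =====

-- bridge spec: all length-p tuples of nonnegative ints summing to r, first part ascending
def pvCompose (r : Int) (p : Nat) : List (List Int) :=
  match p with
  | 0 => []
  | 1 => [[r]]
  | q + 2 => (PySem.List.pyRange 0 (r + 1) 1).flatMap
      (fun c0 => (pvCompose (r - c0) (q + 1)).map (c0 :: ·))

def pvIterExpand : Nat → List (List Int × Int) → List (List Int × Int)
  | 0, l => l
  | p + 1, l => pvIterExpand p (pvExpand l)

theorem pvFoldl_expand (l : List Int) : ∀ ps : List (List Int × Int),
    l.foldl (fun ps _ => pvExpand ps) ps = pvIterExpand l.length ps := by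
  induction l with
  | nil => intro ps; rfl
  | cons x xs ih => intro ps; simp only [List.foldl_cons, List.length_cons]; exact ih (pvExpand ps)

theorem pvIterExpand_append (p : Nat) : ∀ l1 l2 : List (List Int × Int),
    pvIterExpand p (l1 ++ l2) = pvIterExpand p l1 ++ pvIterExpand p l2 := by
  induction p with
  | zero => intro l1 l2; rfl
  | succ q ih =>
    intro l1 l2
    show pvIterExpand q (pvExpand (l1 ++ l2)) = _
    rw [show pvExpand (l1 ++ l2) = pvExpand l1 ++ pvExpand l2 from List.flatMap_append]
    exact ih _ _

theorem pvIterExpand_nil (p : Nat) : pvIterExpand p [] = [] := by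
  induction p with
  | zero => rfl
  | succ q ih => show pvIterExpand q (pvExpand []) = []; simpa [pvExpand] using ih

theorem pvIterExpand_map_single (p : Nat) (g : Int → List Int × Int) :
    ∀ xs : List Int, pvIterExpand p (xs.map g) = xs.flatMap (fun c => pvIterExpand p [g c]) := by
  intro xs
  induction xs with
  | nil => simp [pvIterExpand_nil]
  | cons x xs ih =>
    rw [List.map_cons, show g x :: xs.map g = [g x] ++ xs.map g from rfl,
      pvIterExpand_append, ih, List.flatMap_cons]

theorem pvLayer (p : Nat) : ∀ (chain : List Int) (r : Int),
    (pvIterExpand p [(chain, r)]).map (fun pr => (pr.2 :: pr.1).reverse)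
      = (pvCompose r (p + 1)).map (fun t => chain.reverse ++ t) := by
  induction p with
  | zero =>
    intro chain r
    show [(r :: chain).reverse] = (pvCompose r 1).map _
    simp [pvCompose]
  | succ q ih =>
    intro chain r
    show (pvIterExpand q (pvExpand [(chain, r)])).map _ = (pvCompose r (q + 1 + 1)).map _
    have hq2 : q + 1 + 1 = q + 2 := rfl
    rw [hq2]
    have hexp : pvExpand [(chain, r)]
        = (PySem.List.pyRange 0 (r + 1) 1).map (fun c => (c :: chain, r - c)) := by
      simp [pvExpand]
    rw [hexp, pvIterExpand_map_single, List.map_flatMap]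
    show _ = ((PySem.List.pyRange 0 (r + 1) 1).flatMap
        (fun c0 => (pvCompose (r - c0) (q + 1)).map (c0 :: ·))).map (fun t => chain.reverse ++ t)
    rw [List.map_flatMap]
    apply List.flatMap_congr
    intro c _
    rw [ih (c :: chain) (r - c), List.map_map]
    apply List.map_congr_left
    intro t _
    simp [Function.comp]

theorem pvAlt_eq_compose (n m : Int) :
    generate_all_outcomes_alt n m = pvCompose n (m.toNat + 1) := by
  unfold generate_all_outcomes_alt
  rw [pvFoldl_expand]
  rw [show (PySem.List.pyRange 0 m 1).length = m.toNat by
    rw [PySem.List.length_pyRange_one]; norm_num]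
  have := pvLayer m.toNat [] n
  simpa using this

theorem pvCombos_zero (l : List Int) : pvCombos l 0 = [[]] := by
  simp [pvCombos]

theorem pvCombos_nil (k : Nat) : pvCombos [] (k + 1) = [] := by
  simp [pvCombos]

theorem pvCombos_cons (x : Int) (xs : List Int) (k : Nat) :
    pvCombos (x :: xs) (k + 1) = (pvCombos xs k).map (x :: ·) ++ pvCombos xs (k + 1) := by
  by_cases h : (x :: xs).length < k + 1
  · cases k with
    | zero => simp at h
    | succ q =>
      have h1 : xs.length < q + 1 := by simp at h; omega
      have e0 : pvCombos (x :: xs) (q + 1 + 1) = [] := by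
        unfold pvCombos; rw [if_pos (by simpa using h)]
      have e1 : pvCombos xs (q + 1) = [] := by
        unfold pvCombos; rw [if_pos h1]
      have e2 : pvCombos xs (q + 1 + 1) = [] := by
        unfold pvCombos; rw [if_pos (by omega)]
      rw [e0, e1, e2]; simp
  · simp only [pvCombos, if_neg h]

-- counts computed from a divider list: gaps between consecutive dividers, then the tail gap up to e
def pvCounts (prev e : Int) : List Int → List Int
  | [] => [e - prev - 1]
  | d :: ds => (d - prev - 1) :: pvCounts d e ds

def pvAddFirst : List Int → List Int
  | [] => []
  | c :: cs => (c + 1) :: cs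

theorem pvCounts_shift (prev e : Int) (ds : List Int) :
    pvCounts prev e ds = pvAddFirst (pvCounts (prev + 1) e ds) := by
  cases ds with
  | nil => simp [pvCounts, pvAddFirst]; ring
  | cons d ds => simp [pvCounts, pvAddFirst]; ring

theorem pvFoldl_counts (e : Int) (ds : List Int) : ∀ (acc : List Int) (prev : Int),
    (let st := ds.foldl (fun (a : List Int × Int) d => (a.1 ++ [d - a.2 - 1], d)) (acc, prev);
     st.1 ++ [e - st.2 - 1]) = acc ++ pvCounts prev e ds := by
  induction ds with
  | nil => intro acc prev; simp [pvCounts]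
  | cons d ds ih =>
    intro acc prev
    simp only [List.foldl_cons]
    rw [ih (acc ++ [d - prev - 1]) d]
    simp [pvCounts]

theorem pvRange_shift (a b : Int) :
    PySem.List.pyRange (a + 1) (b + 1) 1 = (PySem.List.pyRange a b 1).map (· + 1) := by
  by_cases h : b ≤ a
  · rw [PySem.List.pyRange_one_eq_nil h, PySem.List.pyRange_one_eq_nil (by omega)]
    simp
  · have : (b - a).toNat < (b - a).toNat + 1 := Nat.lt_succ_self _
    rw [PySem.List.pyRange_one_cons (by omega : a < b), PySem.List.pyRange_one_cons (by omega : a + 1 < b + 1)]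
    simp only [List.map_cons]
    exact congrArg _ (pvRange_shift (a + 1) b)
termination_by (b - a).toNat
decreasing_by omega

theorem pvCompose_split (r : Int) (k : Nat) (h : 0 ≤ r ∨ 1 ≤ k) :
    pvCompose r (k + 2) =
      (pvCompose r (k + 1)).map (0 :: ·) ++ (pvCompose (r - 1) (k + 2)).map pvAddFirst := by
  by_cases hr : 0 ≤ r
  · have h0 : PySem.List.pyRange 0 (r + 1) 1 = 0 :: PySem.List.pyRange 1 (r + 1) 1 :=
      PySem.List.pyRange_one_cons (by omega)
    have hshift : PySem.List.pyRange 1 (r + 1) 1 = (PySem.List.pyRange 0 r 1).map (· + 1) := by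
      have := pvRange_shift 0 r; simpa using this
    show (PySem.List.pyRange 0 (r + 1) 1).flatMap
        (fun c0 => (pvCompose (r - c0) (k + 1)).map (c0 :: ·)) = _
    rw [h0]
    simp only [List.flatMap_cons, hshift, List.flatMap_map]
    congr 1
    · simp
    · cases k with
      | zero =>
        show _ = (List.flatMap _ (PySem.List.pyRange 0 (r - 1 + 1) 1)).map pvAddFirst
        rw [show r - 1 + 1 = r by ring]
        rw [List.map_flatMap]
        apply List.flatMap_congr
        intro c _
        have harg : r - (c + 1) = r - 1 - c := by ring
        simp [pvCompose, pvAddFirst, harg]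
      | succ q =>
        show _ = (List.flatMap _ (PySem.List.pyRange 0 (r - 1 + 1) 1)).map pvAddFirst
        rw [show r - 1 + 1 = r by ring]
        rw [List.map_flatMap]
        apply List.flatMap_congr
        intro c _
        show (pvCompose (r - (c + 1)) (q + 2)).map ((c + 1) :: ·)
            = ((pvCompose (r - 1 - c) (q + 2)).map (c :: ·)).map pvAddFirst
        rw [show r - (c + 1) = r - 1 - c by ring]
        simp [pvAddFirst, Function.comp]
  · -- r < 0, so 1 ≤ k and all three lists are empty
    have hk : 1 ≤ k := h.resolve_left hr
    have hnil : PySem.List.pyRange 0 (r + 1) 1 = [] := PySem.List.pyRange_one_eq_nil (by omega)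
    have hnil' : PySem.List.pyRange 0 (r - 1 + 1) 1 = [] := PySem.List.pyRange_one_eq_nil (by omega)
    cases k with
    | zero => omega
    | succ q =>
      show (PySem.List.pyRange 0 (r + 1) 1).flatMap _ =
        ((PySem.List.pyRange 0 (r + 1) 1).flatMap _).map (0 :: ·) ++
        ((PySem.List.pyRange 0 (r - 1 + 1) 1).flatMap _).map pvAddFirst
      rw [hnil, hnil']
      simp

theorem pvMain (k : Nat) (prev e : Int) :
    (pvCombos (PySem.List.pyRange (prev + 1) e 1) k).map (pvCounts prev e)
      = pvCompose (e - prev - 1 - k) (k + 1) := by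
  cases k with
  | zero =>
    rw [pvCombos_zero]
    show [pvCounts prev e []] = pvCompose (e - prev - 1 - 0) 1
    simp [pvCounts, pvCompose]
  | succ q =>
    by_cases hle : e ≤ prev + 1
    · rw [PySem.List.pyRange_one_eq_nil hle, pvCombos_nil]
      show ([] : List (List Int)).map _ = _
      have : PySem.List.pyRange 0 (e - prev - 1 - (q + 1) + 1) 1 = [] :=
        PySem.List.pyRange_one_eq_nil (by omega)
      show ([] : List (List Int)) = (PySem.List.pyRange 0 (e - prev - 1 - (q + 1) + 1) 1).flatMap _
      rw [this]; simp
    · have hm : (e - (prev + 1)).toNat < (e - prev).toNat := by omega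
      rw [PySem.List.pyRange_one_cons (by omega : prev + 1 < e), pvCombos_cons]
      show ((pvCombos (PySem.List.pyRange (prev + 1 + 1) e 1) q).map ((prev + 1) :: ·) ++
            pvCombos (PySem.List.pyRange (prev + 1 + 1) e 1) (q + 1)).map (pvCounts prev e) = _
      rw [List.map_append, List.map_map]
      have h1 : (pvCounts prev e) ∘ ((prev + 1) :: ·)
          = (fun t => (0 : Int) :: t) ∘ (pvCounts (prev + 1) e) := by
        funext t
        simp [Function.comp, pvCounts]
      have h2 : (pvCombos (PySem.List.pyRange (prev + 1 + 1) e 1) (q + 1)).map (pvCounts prev e)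
          = ((pvCombos (PySem.List.pyRange (prev + 1 + 1) e 1) (q + 1)).map
              (pvCounts (prev + 1) e)).map pvAddFirst := by
        rw [List.map_map]
        apply List.map_congr_left
        intro t _
        simp only [Function.comp_apply]
        exact pvCounts_shift prev e t
      rw [h1, h2]
      rw [← List.map_map (f := pvCounts (prev + 1) e) (g := fun t => (0 : Int) :: t)]
      rw [pvMain q (prev + 1) e, pvMain (q + 1) (prev + 1) e]
      have hside : 0 ≤ e - prev - 1 - ((q + 1 : Nat) : Int) ∨ 1 ≤ q := by
        by_cases hq : q = 0
        · left; subst hq; push_cast; omega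
        · right; omega
      have hq2 : q + 1 + 1 = q + 2 := rfl
      rw [hq2]
      rw [pvCompose_split (e - prev - 1 - ((q + 1 : Nat) : Int)) q hside]
      have e1 : e - (prev + 1) - 1 - (q : Int) = e - prev - 1 - ((q + 1 : Nat) : Int) := by
        push_cast; ring
      have e2 : e - (prev + 1) - 1 - ((q + 1 : Nat) : Int)
          = e - prev - 1 - ((q + 1 : Nat) : Int) - 1 := by push_cast; ring
      rw [e1, e2]
termination_by (e - prev).toNat
decreasing_by all_goals omega

-- ===== VERDICT (by name: the statement is the Claim_ definition above) =====
theorem generate_all_outcomes_spec : Claim_equal_generate_all_outcomes := by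
  intro n m _ hpre
  unfold Spec_generate_all_outcomes
  rw [pvAlt_eq_compose]
  unfold generate_all_outcomes
  have hcast : (m.toNat : Int) = m := Int.toNat_of_nonneg hpre
  have hbody : ∀ ds : List Int,
      (let st := ds.foldl (fun (a : List Int × Int) d => (a.1 ++ [d - a.2 - 1], d)) ([], -1);
       st.1 ++ [n + m - st.2 - 1]) = pvCounts (-1) (n + m) ds := by
    intro ds
    have := pvFoldl_counts (n + m) ds [] (-1)
    simpa using this
  calc (pvCombos (PySem.List.pyRange 0 (n + m) 1) m.toNat).map (fun dividers =>
          let st := dividers.foldl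
            (fun (acc : List Int × Int) d => (acc.1 ++ [d - acc.2 - 1], d)) ([], -1)
          st.1 ++ [n + m - st.2 - 1])
      = (pvCombos (PySem.List.pyRange 0 (n + m) 1) m.toNat).map (pvCounts (-1) (n + m)) := by
        apply List.map_congr_left; intro ds _; exact hbody ds
    _ = pvCompose (n + m - (-1) - 1 - m.toNat) (m.toNat + 1) := by
        have := pvMain m.toNat (-1) (n + m)
        simpa using this
    _ = pvCompose n (m.toNat + 1) := by rw [hcast]; ring_nf
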